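-- pv_equiv track=rewrite | github.com/RudyMartin/tidyllm-sentence | tidyllm_sentence/utils/stemmer.py | _step4
-- ===== SOURCE A (Python) =====
-- def _measure(word: str) -> int:
--     """Count VC sequences (simplified)."""
--     cv_pattern = []
--     for c in word:
--         if c in 'aeiou':
--             cv_pattern.append('V')
--         else:
--             cv_pattern.append('C')
--
--     # Simplify consecutive letters
--     simplified = []
--     for i, c in enumerate(cv_pattern):
--         if i == 0 or c != cv_pattern[i-1]:
--             simplified.append(c)
--
--     # Count VC pairs
--     vc_count = 0
--     for i in range(len(simplified) - 1):
--         if simplified[i] == 'V' and simplified[i+1] == 'C':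
--             vc_count += 1
--
--     return vc_count
--
-- def _step4(word: str) -> str:
--     """Step 4 of Porter Stemmer."""
--     suffixes = ['al', 'ance', 'ence', 'er', 'ic', 'able', 'ible', 'ant',
--                 'ement', 'ment', 'ent', 'ion', 'ou', 'ism', 'ate', 'iti',
--                 'ous', 'ive', 'ize']
--
--     for suffix in suffixes:
--         if word.endswith(suffix):
--             stem = word[:-len(suffix)]
--             if _measure(stem) > 1:
--                 if suffix == 'ion':
--                     if len(stem) > 0 and stem[-1] in 'st':
--                         return stem
--                 else:
--                     return stem
--     return word
-- ===== SOURCE B (Python) =====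
-- def _measure(word: str) -> int:
--     """Count VC sequences = adjacent vowel->consonant pairs in the raw string."""
--     return sum(a in 'aeiou' and b not in 'aeiou' for a, b in zip(word, word[1:]))
--
--
-- def _step4(word: str) -> str:
--     """Step 4 of Porter Stemmer."""
--     def ok(s):
--         stem = word[:-len(s)]
--         return (word.endswith(s) and _measure(stem) > 1
--                 and (s != 'ion' or stem[-1:] in ('s', 't')))
--     hit = next((s for s in 'al ance ence er ic able ible ant ement ment ent '
--                 'ion ou ism ate iti ous ive ize'.split() if ok(s)), None)
--     return word[:-len(hit)] if hit is not None else word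
-- ===== Notes on version B (the rewrite author's own statement) =====
-- stated objective: simpler
-- what changed: _measure's three list-building passes become a one-line count of adjacent vowel->consonant pairs over zip(word, word[1:]) (no class list, no dedup pass), and _step4's nested if-cascade becomes a first-match search over the suffixes (string split once) with one flat boolean condition per suffix.
import Mathlib
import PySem

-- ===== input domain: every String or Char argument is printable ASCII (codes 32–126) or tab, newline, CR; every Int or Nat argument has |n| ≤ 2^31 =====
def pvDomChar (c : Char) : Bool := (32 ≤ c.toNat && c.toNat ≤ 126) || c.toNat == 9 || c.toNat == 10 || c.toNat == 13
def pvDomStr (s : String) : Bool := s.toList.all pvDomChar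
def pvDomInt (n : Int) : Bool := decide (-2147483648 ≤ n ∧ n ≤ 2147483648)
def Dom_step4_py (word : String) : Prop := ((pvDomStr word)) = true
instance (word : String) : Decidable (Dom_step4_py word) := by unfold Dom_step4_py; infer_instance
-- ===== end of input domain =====

-- B replaces _measure's three list-building passes by one count of adjacent vowel→consonant
-- pairs over zip(word, word[1:]) and _step4's nested if-cascade by a first-match search over
-- the suffixes with a flat boolean condition (objective: simpler).

-- ===== PORT A =====
-- _measure of A: three passes (class list, adjacent-dedup via index lookback, VC-pair count).
-- 'c in "aeiou"' / 'stem[-1] in "st"' are single-char membership, ported as list membership (exact).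
def step4_measure (w : List Char) : Int :=
  let cv : List Char :=
    w.foldl (fun acc c => acc ++ [if c ∈ (['a','e','i','o','u'] : List Char) then 'V' else 'C']) []
  let simplified : List Char :=
    (PySem.List.enumerate cv).foldl
      (fun acc ic =>
        if ic.1 = 0 ∨ ic.2 ≠ PySem.List.pyGetD cv (ic.1 - 1) ' ' then acc ++ [ic.2] else acc) []
  (PySem.List.pyRange 0 ((simplified.length : Int) - 1) 1).foldl
    (fun acc i =>
      if PySem.List.pyGetD simplified i ' ' = 'V' ∧ PySem.List.pyGetD simplified (i + 1) ' ' = 'C'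
      then acc + 1 else acc) (0 : Int)

def step4_suffixes : List (List Char) :=
  [['a','l'], ['a','n','c','e'], ['e','n','c','e'], ['e','r'], ['i','c'],
   ['a','b','l','e'], ['i','b','l','e'], ['a','n','t'], ['e','m','e','n','t'],
   ['m','e','n','t'], ['e','n','t'], ['i','o','n'], ['o','u'], ['i','s','m'],
   ['a','t','e'], ['i','t','i'], ['o','u','s'], ['i','v','e'], ['i','z','e']]

def step4_loop (word : List Char) : List (List Char) → List Char
  | [] => word
  | s :: rest =>
    if PySem.Chars.endswith word s = true then
      let stem := PySem.List.slice word none (some (-(s.length : Int)))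
      if step4_measure stem > 1 then
        if s = ['i','o','n'] then
          if 0 < stem.length ∧ (PySem.List.pyGet? stem (-1)).getD ' ' ∈ (['s','t'] : List Char) then
            stem
          else step4_loop word rest
        else stem
      else step4_loop word rest
    else step4_loop word rest

def step4_py (word : String) : String := String.ofList (step4_loop word.toList step4_suffixes)

-- ===== PORT B =====
-- _measure of B: sum over zip(word, word[1:]) of booleans = count of adjacent (vowel, consonant)
-- pairs; the 0/1-sum is ported as countP (PYSEM: a 0/1-sum IS List.countP; zip is List.zip).
def step4_alt_measure (w : List Char) : Int :=
  (((List.zip w (PySem.List.slice w (some 1) none)).countP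
      (fun p => decide (p.1 ∈ (['a','e','i','o','u'] : List Char)) &&
                decide (p.2 ∉ (['a','e','i','o','u'] : List Char)))) : Nat)

-- the flat condition 'ok(s)' of B (stem[-1:] in ('s','t') is the one-char tail slice)
def step4_alt_ok (w : List Char) (s : List Char) : Bool :=
  let stem := PySem.List.slice w none (some (-(s.length : Int)))
  PySem.Chars.endswith w s && decide (step4_alt_measure stem > 1) &&
    (decide (s ≠ (['i','o','n'] : List Char)) ||
     decide (PySem.List.slice stem (some (-1)) none ∈ ([['s'],['t']] : List (List Char))))

def step4_py_alt (word : String) : String :=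
  let w := word.toList
  match (PySem.Str.split₀
      "al ance ence er ic able ible ant ement ment ent ion ou ism ate iti ous ive ize").find?
      (fun s => step4_alt_ok w s.toList) with
  | some hit => String.ofList (PySem.List.slice w none (some (-(hit.toList.length : Int))))
  | none => word

-- ===== PRECONDITION & SPEC =====
def Spec_step4_py (word : String) (out : String) : Prop := out = step4_py_alt word
instance (word : String) (out : String) : Decidable (Spec_step4_py word out) := by
  unfold Spec_step4_py; infer_instance

-- ===== CLAIM (what is proved, stated in full; the proofs are below) =====
def Claim_equal_step4_py : Prop := ∀ (word : String), Dom_step4_py word → Spec_step4_py word (step4_py word)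

-- ===== LEMMAS AND PROOFS =====

/-- class of a character: vowel → 'V', else 'C'. -/
def pvCls (c : Char) : Char := if c ∈ (['a','e','i','o','u'] : List Char) then 'V' else 'C'

/-- adjacent-dedup tail: keep `c` iff it differs from the preceding original char. -/
def pvAid (prev : Char) : List Char → List Char
  | [] => []
  | c :: cs => if c ≠ prev then c :: pvAid c cs else pvAid c cs

def pvDedup : List Char → List Char
  | [] => []
  | c :: cs => c :: pvAid c cs

/-- count adjacent ('V','C') pairs given the previous char. -/
def pvPf (prev : Char) : List Char → Int
  | [] => 0
  | c :: cs => (if prev = 'V' ∧ c = 'C' then 1 else 0) + pvPf c cs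

def pvPl : List Char → Int
  | [] => 0
  | c :: cs => pvPf c cs

/-- the three passes of A's `_measure`, as named stages (definitionally equal to the port). -/
def pvStage1 (w : List Char) : List Char :=
  w.foldl (fun acc c => acc ++ [if c ∈ (['a','e','i','o','u'] : List Char) then 'V' else 'C']) []

def pvStage2 (cv : List Char) : List Char :=
  (PySem.List.enumerate cv).foldl
    (fun acc ic =>
      if ic.1 = 0 ∨ ic.2 ≠ PySem.List.pyGetD cv (ic.1 - 1) ' ' then acc ++ [ic.2] else acc) []

def pvStage3 (l : List Char) : Int :=
  (PySem.List.pyRange 0 ((l.length : Int) - 1) 1).foldl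
    (fun acc i =>
      if PySem.List.pyGetD l i ' ' = 'V' ∧ PySem.List.pyGetD l (i + 1) ' ' = 'C'
      then acc + 1 else acc) (0 : Int)

theorem pv_pyGetD_cons_succ (x : Char) (xs : List Char) (k : Nat) (d : Char) :
    PySem.List.pyGetD (x :: xs) ((k : Int) + 1) d = PySem.List.pyGetD xs (k : Int) d := by
  have h : ((k : Int) + 1) = (((k + 1 : Nat) : Nat) : Int) := by push_cast; ring
  rw [h, PySem.List.pyGetD_natCast, PySem.List.pyGetD_natCast]
  rfl

theorem pv_pyGetD_cons_add_one (x : Char) (xs : List Char) (i : Int) (h : 0 ≤ i) (d : Char) :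
    PySem.List.pyGetD (x :: xs) (i + 1) d = PySem.List.pyGetD xs i d := by
  lift i to Nat using h
  exact pv_pyGetD_cons_succ x xs i d

theorem pv_stage1_eq (w : List Char) : ∀ acc : List Char,
    w.foldl (fun acc c => acc ++ [if c ∈ (['a','e','i','o','u'] : List Char) then 'V' else 'C']) acc
      = acc ++ w.map pvCls := by
  induction w with
  | nil => intro acc; simp
  | cons c cs ih => intro acc; rw [List.foldl_cons, ih]; simp [pvCls]

theorem pv_stage2_gen (cs : List Char) : ∀ (pre acc : List Char) (p : Char),
    pre ≠ [] → pre.getLast? = some p →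
    (PySem.List.enumerate cs (pre.length : Int)).foldl
      (fun acc ic =>
        if ic.1 = 0 ∨ ic.2 ≠ PySem.List.pyGetD (pre ++ cs) (ic.1 - 1) ' ' then acc ++ [ic.2] else acc) acc
      = acc ++ pvAid p cs := by
  induction cs with
  | nil => intro pre acc p _ _; simp [PySem.List.enumerate, pvAid]
  | cons c cs' ih =>
    intro pre acc p hne hlast
    rw [PySem.List.enumerate_cons, List.foldl_cons]
    dsimp only
    have hlen : 1 ≤ pre.length := by
      cases pre with | nil => exact absurd rfl hne | cons a l => simp
    have hz : ¬ ((pre.length : Int) = 0) := by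
      simp only [Nat.cast_eq_zero]; omega
    have hidx : (pre.length : Int) - 1 = ((pre.length - 1 : Nat) : Int) := by push_cast [hlen]; ring
    have hget : PySem.List.pyGetD (pre ++ c :: cs') ((pre.length : Int) - 1) ' ' = p := by
      rw [hidx, PySem.List.pyGetD_natCast]
      rw [List.getD_eq_getElem?_getD, List.getElem?_append_left (by omega)]
      rw [← List.getLast?_eq_getElem?]
      simp [hlast]
    have hstart : (pre.length : Int) + 1 = (((pre ++ [c]).length : Nat) : Int) := by
      simp
    have hlist : pre ++ c :: cs' = (pre ++ [c]) ++ cs' := by simp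
    by_cases hc : c = p
    · rw [if_neg (by rw [hget]; rintro (h | h); exact hz h; exact h hc)]
      have hrec := ih (pre ++ [c]) acc c (by simp) (by simp)
      rw [hstart, hlist, hrec]
      simp [pvAid, hc]
    · rw [if_pos (by rw [hget]; exact Or.inr hc)]
      have hrec := ih (pre ++ [c]) (acc ++ [c]) c (by simp) (by simp)
      rw [hstart, hlist, hrec]
      simp [pvAid, hc]

theorem pv_stage2_eq (cv : List Char) : pvStage2 cv = pvDedup cv := by
  cases cv with
  | nil => simp [pvStage2, PySem.List.enumerate, pvDedup]
  | cons c cs =>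
    unfold pvStage2
    rw [PySem.List.enumerate_cons, List.foldl_cons]
    have h0 : ((0 : Int) = 0 ∨ c ≠ PySem.List.pyGetD (c :: cs) ((0 : Int) - 1) ' ') := Or.inl rfl
    rw [if_pos h0]
    have hs : (0 : Int) + 1 = ((([c] : List Char).length : Nat) : Int) := by simp
    have hl : c :: cs = [c] ++ cs := rfl
    rw [hs, hl, pv_stage2_gen cs [c] ([] ++ [c]) c (by simp) (by simp)]
    simp [pvDedup]

theorem pv_stage3_range (l : List Char) : ∀ (acc : Int),
    (List.range (l.length - 1)).foldl
      (fun (acc : Int) (k : Nat) =>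
        if PySem.List.pyGetD l ((k : Nat) : Int) ' ' = 'V' ∧
           PySem.List.pyGetD l (((k : Nat) : Int) + 1) ' ' = 'C'
        then acc + 1 else acc) acc = acc + pvPl l := by
  induction l with
  | nil => intro acc; simp [pvPl]
  | cons a tl ih =>
    intro acc
    cases tl with
    | nil => simp [pvPl, pvPf]
    | cons b rest =>
      have hlen : (a :: b :: rest : List Char).length - 1 = rest.length + 1 := by simp
      rw [hlen, List.range_succ_eq_map, List.foldl_cons, List.foldl_map]
      have hext := List.foldl_ext
        (fun (acc : Int) (k : Nat) =>
          if PySem.List.pyGetD (a :: b :: rest) ((Nat.succ k : Nat) : Int) ' ' = 'V' ∧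
             PySem.List.pyGetD (a :: b :: rest) (((Nat.succ k : Nat) : Int) + 1) ' ' = 'C'
          then acc + 1 else acc)
        (fun (acc : Int) (k : Nat) =>
          if PySem.List.pyGetD (b :: rest) ((k : Nat) : Int) ' ' = 'V' ∧
             PySem.List.pyGetD (b :: rest) (((k : Nat) : Int) + 1) ' ' = 'C'
          then acc + 1 else acc)
        (if PySem.List.pyGetD (a :: b :: rest) ((0 : Nat) : Int) ' ' = 'V' ∧
            PySem.List.pyGetD (a :: b :: rest) (((0 : Nat) : Int) + 1) ' ' = 'C'
         then acc + 1 else acc)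
        (l := List.range rest.length)
        (by
          intro acc' k _
          dsimp only
          have h1 : ((Nat.succ k : Nat) : Int) = ((k : Nat) : Int) + 1 := by push_cast; ring
          rw [h1]
          rw [pv_pyGetD_cons_add_one a (b :: rest) ((k : Int) + 1) (by omega)]
          rw [pv_pyGetD_cons_add_one a (b :: rest) (k : Int) (by omega)])
      rw [hext]
      have htl : rest.length = (b :: rest : List Char).length - 1 := by simp
      rw [htl, ih]
      have hfirst : PySem.List.pyGetD (a :: b :: rest) ((0 : Nat) : Int) ' ' = a := by
        rw [PySem.List.pyGetD_natCast]; rfl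
      have hsecond : PySem.List.pyGetD (a :: b :: rest) (((0 : Nat) : Int) + 1) ' ' = b := by
        rw [show (((0 : Nat) : Int) + 1) = (((0 : Nat) : Int) + 1) from rfl, pv_pyGetD_cons_succ,
            PySem.List.pyGetD_natCast]
        rfl
      rw [hfirst, hsecond]
      simp only [pvPl, pvPf]
      split_ifs <;> omega

theorem pv_stage3_eq (l : List Char) : pvStage3 l = pvPl l := by
  unfold pvStage3
  rw [PySem.List.pyRange_one]
  rw [List.foldl_map]
  have hn : (((l.length : Int) - 1) - 0).toNat = l.length - 1 := by omega
  rw [hn]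
  have hext := List.foldl_ext
    (fun (acc : Int) (k : Nat) =>
      if PySem.List.pyGetD l (0 + (k : Int)) ' ' = 'V' ∧
         PySem.List.pyGetD l ((0 + (k : Int)) + 1) ' ' = 'C'
      then acc + 1 else acc)
    (fun (acc : Int) (k : Nat) =>
      if PySem.List.pyGetD l ((k : Nat) : Int) ' ' = 'V' ∧
         PySem.List.pyGetD l (((k : Nat) : Int) + 1) ' ' = 'C'
      then acc + 1 else acc)
    (0 : Int) (l := List.range (l.length - 1))
    (by intro acc k _; dsimp only; norm_num)
  rw [hext, pv_stage3_range l 0, zero_add]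

theorem pv_pf_aid (l : List Char) : ∀ prev, pvPf prev (pvAid prev l) = pvPf prev l := by
  induction l with
  | nil => intro prev; rfl
  | cons c cs ih =>
    intro prev
    by_cases h : c = prev
    · subst h
      simp [pvAid, pvPf, ih c]
      rintro rfl; decide
    · simp [pvAid, h, pvPf, ih c]

theorem pv_pl_dedup (l : List Char) : pvPl (pvDedup l) = pvPl l := by
  cases l with
  | nil => rfl
  | cons c cs => simp [pvDedup, pvPl, pv_pf_aid]

theorem pv_measureA (w : List Char) : step4_measure w = pvPl (w.map pvCls) := by
  have h : step4_measure w = pvStage3 (pvStage2 (pvStage1 w)) := rfl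
  rw [h, pv_stage2_eq, pv_stage3_eq, pv_pl_dedup]
  have h1 : pvStage1 w = w.map pvCls := by
    unfold pvStage1; rw [pv_stage1_eq]; simp
  rw [h1]

theorem pv_cls_V (c : Char) : pvCls c = 'V' ↔ c ∈ (['a','e','i','o','u'] : List Char) := by
  unfold pvCls; split_ifs with h <;> simp [h]

theorem pv_cls_C (c : Char) : pvCls c = 'C' ↔ c ∉ (['a','e','i','o','u'] : List Char) := by
  unfold pvCls; split_ifs with h <;> simp [h]

theorem pv_zip_count (cs : List Char) : ∀ a : Char,
    (((List.zip (a :: cs) cs).countP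
        (fun p => decide (p.1 ∈ (['a','e','i','o','u'] : List Char)) &&
                  decide (p.2 ∉ (['a','e','i','o','u'] : List Char)))) : Int)
      = pvPf (pvCls a) (cs.map pvCls) := by
  induction cs with
  | nil => intro a; simp [pvPf]
  | cons b rest ih =>
    intro a
    rw [List.zip_cons_cons, List.countP_cons]
    simp only [List.map_cons, pvPf]
    rw [← ih b]
    have hiff : ((decide (a ∈ (['a','e','i','o','u'] : List Char)) &&
        decide (b ∉ (['a','e','i','o','u'] : List Char))) = true)
        ↔ (pvCls a = 'V' ∧ pvCls b = 'C') := by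
      rw [pv_cls_V, pv_cls_C]; simp
    by_cases h : pvCls a = 'V' ∧ pvCls b = 'C'
    · rw [if_pos ((hiff.mpr h)), if_pos h]; push_cast; ring
    · rw [if_neg (fun hb => h (hiff.mp hb)), if_neg h]; push_cast; ring

theorem pv_measureB (w : List Char) : step4_alt_measure w = pvPl (w.map pvCls) := by
  cases w with
  | nil => rfl
  | cons a cs =>
    unfold step4_alt_measure
    rw [PySem.List.slice_from_one]
    show (((List.zip (a :: cs) cs).countP _ : Nat) : Int) = _
    rw [pv_zip_count cs a]
    simp [pvPl]

theorem pv_measure_eq (w : List Char) : step4_measure w = step4_alt_measure w := by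
  rw [pv_measureA, pv_measureB]

theorem pv_ion_iff (l : List Char) :
    (PySem.List.slice l (some (-1)) none ∈ ([['s'],['t']] : List (List Char)))
      ↔ (0 < l.length ∧ (PySem.List.pyGet? l (-1)).getD ' ' ∈ (['s','t'] : List Char)) := by
  induction l using List.reverseRecOn with
  | nil => simp [PySem.List.slice_from_neg_one]
  | append_singleton ys y _ =>
    rw [PySem.List.slice_from_neg_one, PySem.List.pyGet?_neg_one_append_singleton]
    have hd : (ys ++ [y]).length - 1 = ys.length := by simp
    rw [hd, List.drop_left]
    simp

theorem pv_loop_eq (ss : List (List Char)) (w : List Char) :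
    step4_loop w ss =
      (match ss.find? (step4_alt_ok w) with
       | some s => PySem.List.slice w none (some (-(s.length : Int)))
       | none => w) := by
  induction ss with
  | nil => simp [step4_loop]
  | cons s rest ih =>
    by_cases he : PySem.Chars.endswith w s = true
    · have hms := pv_measure_eq (PySem.List.slice w none (some (-(s.length : Int))))
      by_cases hm : step4_alt_measure (PySem.List.slice w none (some (-(s.length : Int)))) > 1
      · by_cases hi : s = ['i','o','n']
        · by_cases hl : 0 < (PySem.List.slice w none (some (-(s.length : Int)))).length ∧
              (PySem.List.pyGet? (PySem.List.slice w none (some (-(s.length : Int)))) (-1)).getD ' '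
                ∈ (['s','t'] : List Char)
          · have hok : step4_alt_ok w s = true := by
              unfold step4_alt_ok
              simp only [he, Bool.true_and]
              rw [Bool.and_eq_true, Bool.or_eq_true]
              exact ⟨by simpa using hm, Or.inr (by simpa using (pv_ion_iff _).mpr hl)⟩
            rw [List.find?_cons_of_pos hok]
            simp only [step4_loop, he, if_true, hms]
            rw [if_pos hm, if_pos hi, if_pos hl]
          · have hok : step4_alt_ok w s = false := by
              unfold step4_alt_ok
              simp only [he, Bool.true_and]
              rw [Bool.and_eq_false_iff, Bool.or_eq_false_iff]
              refine Or.inr ⟨by simpa using hi, ?_⟩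
              simpa using fun hmem => hl ((pv_ion_iff _).mp hmem)
            rw [List.find?_cons_of_neg (by simp [hok])]
            rw [← ih]
            simp only [step4_loop, he, if_true, hms]
            rw [if_pos hm, if_pos hi, if_neg hl]
        · have hok : step4_alt_ok w s = true := by
            unfold step4_alt_ok
            simp only [he, Bool.true_and]
            rw [Bool.and_eq_true, Bool.or_eq_true]
            exact ⟨by simpa using hm, Or.inl (by simpa using hi)⟩
          rw [List.find?_cons_of_pos hok]
          simp only [step4_loop, he, if_true, hms]
          rw [if_pos hm, if_neg hi]
      · have hok : step4_alt_ok w s = false := by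
          unfold step4_alt_ok
          simp only [he, Bool.true_and]
          rw [Bool.and_eq_false_iff]
          exact Or.inl (by simpa using hm)
        rw [List.find?_cons_of_neg (by simp [hok])]
        rw [← ih]
        simp only [step4_loop, he, if_true, hms]
        rw [if_neg hm]
    · have hok : step4_alt_ok w s = false := by
        unfold step4_alt_ok
        simp only [Bool.and_eq_false_iff]
        exact Or.inl (Or.inl (by simpa using he))
      rw [List.find?_cons_of_neg (by simp [hok])]
      rw [← ih]
      simp [step4_loop, he]

theorem pv_split_suffixes :
    (PySem.Str.split₀
      "al ance ence er ic able ible ant ement ment ent ion ou ism ate iti ous ive ize")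
    = ["al","ance","ence","er","ic","able","ible","ant","ement","ment","ent","ion","ou","ism",
       "ate","iti","ous","ive","ize"] := by decide

theorem pv_suffixes_map : step4_suffixes =
    (["al","ance","ence","er","ic","able","ible","ant","ement","ment","ent","ion","ou","ism",
      "ate","iti","ous","ive","ize"] : List String).map String.toList := by decide

-- ===== VERDICT (by name: the statement is the Claim_ definition above) =====
theorem step4_py_spec : Claim_equal_step4_py := by
  intro word _
  unfold Spec_step4_py
  show step4_py word = step4_py_alt word
  simp only [step4_py, step4_py_alt, pv_split_suffixes]
  rw [pv_suffixes_map, pv_loop_eq, List.find?_map]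
  have hfun : (fun s : String => step4_alt_ok word.toList s.toList)
      = (step4_alt_ok word.toList) ∘ String.toList := rfl
  rw [hfun]
  cases h : (["al","ance","ence","er","ic","able","ible","ant","ement","ment","ent","ion","ou",
      "ism","ate","iti","ous","ive","ize"] : List String).find?
      ((step4_alt_ok word.toList) ∘ String.toList) with
  | none => simp
  | some hit => simp
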